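-- pv_equiv track=rewrite | github.com/zhan4808/atalla-models | functional_sim/src/misc/compiler_checks.py | is_packet_independent_check
-- ===== SOURCE A (Python) =====
-- def is_packet_independent_check(decoded_packet):
--     """
--     Ensures instructions inside a VLIW packet do NOT share any registers
--     across scalar, vector, or mask register files.
--
--     ANY overlap (read-read is OK, but any read/write/write-read/write-write
--     involving the same register) makes the packet illegal.
--     """
--
--     # Track which registers appear at all in *any* operand position
--     scalar_used = set()
--     vector_used = set()
--     mask_used = set()
--
--     def add_scalar(reg):
--         if reg in scalar_used:
--             return False
--         scalar_used.add(reg)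
--         return True
--
--     def add_vector(reg):
--         if reg in vector_used:
--             return False
--         vector_used.add(reg)
--         return True
--
--     def add_mask(reg):
--         if reg in mask_used:
--             return False
--         mask_used.add(reg)
--         return True
--
--     # ----------------------------
--     # Extract all operands per instruction
--     # ----------------------------
--     for instr in decoded_packet:
--
--         # ---- scalar regs ----
--         for key in ("rs1", "rs2", "rd"):
--             if key in instr:
--                 if not add_scalar(instr[key]):
--                     return False
--
--         # ---- vector regs ----
--         for key in ("vs1", "vs2", "vd", "vmd", "vms"):
--             if key in instr:
--                 if not add_vector(instr[key]):
--                     return False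
--
--         # ---- mask regs ----
--         if "mask" in instr:
--             if not add_mask(instr["mask"]):
--                 return False
--
--         if "mask_dest" in instr:   # if your ISA later writes masks
--             if not add_mask(instr["mask_dest"]):
--                 return False
--
--     return True
-- ===== SOURCE B (Python) =====
-- def is_packet_independent_check(decoded_packet):
--     # Collect every register occurrence per register file, then a packet is
--     # legal iff no file contains a repeated register.
--     scalars, vectors, masks = [], [], []
--     for instr in decoded_packet:
--         for key in ("rs1", "rs2", "rd"):
--             if key in instr:
--                 scalars.append(instr[key])
--         for key in ("vs1", "vs2", "vd", "vmd", "vms"):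
--             if key in instr:
--                 vectors.append(instr[key])
--         for key in ("mask", "mask_dest"):
--             if key in instr:
--                 masks.append(instr[key])
--     return (len(scalars) == len(set(scalars))
--             and len(vectors) == len(set(vectors))
--             and len(masks) == len(set(masks)))
-- ===== Notes on version B (the rewrite author's own statement) =====
-- stated objective: simpler
-- what changed: Replaces A's three mutable used-sets with early-return membership tests by a single collection pass that gathers all register occurrences per file and one final duplicate-freeness check (len == len(set)).
import Mathlib
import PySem

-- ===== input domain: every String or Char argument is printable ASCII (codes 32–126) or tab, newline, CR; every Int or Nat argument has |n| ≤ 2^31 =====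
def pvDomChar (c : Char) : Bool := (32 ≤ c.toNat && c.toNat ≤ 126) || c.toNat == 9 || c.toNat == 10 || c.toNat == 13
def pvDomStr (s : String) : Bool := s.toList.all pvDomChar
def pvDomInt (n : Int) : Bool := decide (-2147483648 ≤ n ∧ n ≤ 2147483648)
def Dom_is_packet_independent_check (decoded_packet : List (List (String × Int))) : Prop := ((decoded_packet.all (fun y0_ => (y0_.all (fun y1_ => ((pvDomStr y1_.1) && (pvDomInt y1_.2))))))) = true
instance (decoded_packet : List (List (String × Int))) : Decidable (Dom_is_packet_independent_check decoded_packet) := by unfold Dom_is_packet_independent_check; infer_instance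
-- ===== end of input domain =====

-- B collects all register occurrences per file in one pass and checks duplicate-freeness once, instead of A's three mutable used-sets with early return (simpler decomposition; return value only).
-- ===== PORT A =====
-- add_scalar/add_vector/add_mask: returns none where Python returns False (register already used)
def pvAddReg (used : PySem.Set Int) (r : Int) : Option (PySem.Set Int) :=
  if PySem.Set.contains used r then none else some (PySem.Set.add used r)

-- 'for key in keys: if key in instr: if not add(instr[key]): return False'
def pvStepKeys (keys : List String) (instr : List (String × Int)) (used : PySem.Set Int) :
    Option (PySem.Set Int) :=
  match keys with
  | [] => some used
  | k :: ks =>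
    match instr.lookup k with
    | none => pvStepKeys ks instr used
    | some v =>
      match pvAddReg used v with
      | none => none
      | some used' => pvStepKeys ks instr used'

def pvLoopA (pkt : List (List (String × Int)))
    (ss vs ms : PySem.Set Int) : Bool :=
  match pkt with
  | [] => true
  | instr :: rest =>
    match pvStepKeys ["rs1", "rs2", "rd"] instr ss with
    | none => false
    | some ss' =>
      match pvStepKeys ["vs1", "vs2", "vd", "vmd", "vms"] instr vs with
      | none => false
      | some vs' =>
        match pvStepKeys ["mask", "mask_dest"] instr ms with
        | none => false
        | some ms' => pvLoopA rest ss' vs' ms'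

def is_packet_independent_check (decoded_packet : List (List (String × Int))) : Bool :=
  pvLoopA decoded_packet PySem.Set.empty PySem.Set.empty PySem.Set.empty

-- ===== PORT B =====
-- inner loop of B: 'for key in keys: if key in instr: out.append(instr[key])'
def pvKeyVals (keys : List String) (instr : List (String × Int)) : List Int :=
  match keys with
  | [] => []
  | k :: ks =>
    (match instr.lookup k with
     | some v => [v]
     | none => []) ++ pvKeyVals ks instr

-- outer loop of B over the packet, collecting one register file's occurrences
def pvCollect (keys : List String) (pkt : List (List (String × Int))) : List Int :=
  match pkt with
  | [] => []
  | instr :: rest => pvKeyVals keys instr ++ pvCollect keys rest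

def is_packet_independent_check_alt (decoded_packet : List (List (String × Int))) : Bool :=
  let scalars := pvCollect ["rs1", "rs2", "rd"] decoded_packet
  let vectors := pvCollect ["vs1", "vs2", "vd", "vmd", "vms"] decoded_packet
  let masks := pvCollect ["mask", "mask_dest"] decoded_packet
  (scalars.length == (PySem.Set.ofList scalars).length)
    && (vectors.length == (PySem.Set.ofList vectors).length)
    && (masks.length == (PySem.Set.ofList masks).length)

-- ===== PRECONDITION & SPEC =====
def Spec_is_packet_independent_check (decoded_packet : List (List (String × Int))) (out : Bool) : Prop := out = is_packet_independent_check_alt decoded_packet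
instance (decoded_packet : List (List (String × Int))) (out : Bool) : Decidable (Spec_is_packet_independent_check decoded_packet out) := by unfold Spec_is_packet_independent_check; infer_instance

-- ===== CLAIM (what is proved, stated in full; the proofs are below) =====
def Claim_equal_is_packet_independent_check : Prop := ∀ (decoded_packet : List (List (String × Int))), Dom_is_packet_independent_check decoded_packet → Spec_is_packet_independent_check decoded_packet (is_packet_independent_check decoded_packet)

-- ===== LEMMAS AND PROOFS =====

-- A's key loop succeeds iff appending this instruction's values keeps the list duplicate-free,
-- and then its new state is exactly that appended list.
theorem pvStepKeys_eq (keys : List String) (instr : List (String × Int)) :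
    ∀ s : List Int, s.Nodup →
      pvStepKeys keys instr s =
        if (s ++ pvKeyVals keys instr).Nodup then some (s ++ pvKeyVals keys instr) else none := by
  induction keys with
  | nil => intro s hs; simp [pvStepKeys, pvKeyVals, hs]
  | cons k ks ih =>
    intro s hs
    simp only [pvStepKeys, pvKeyVals]
    cases hl : instr.lookup k with
    | none => simpa using ih s hs
    | some v =>
      simp only [pvAddReg, PySem.Set.contains]
      by_cases hv : v ∈ s
      · have : ¬ (s ++ v :: pvKeyVals ks instr).Nodup := by
          intro h
          exact (List.disjoint_of_nodup_append h) hv (List.mem_cons_self)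
        simp [hv, this]
      · have hadd : PySem.Set.add s v = s ++ [v] := by
          simp [PySem.Set.add, PySem.Set.contains, hv]
        have hs' : (s ++ [v]).Nodup := by
          refine List.Nodup.append hs (List.nodup_singleton v) (fun a ha hb => ?_)
          simp only [List.mem_singleton] at hb
          exact hv (hb ▸ ha)
        have hmem : s.contains v = false := by
          simp [hv]
        simp only [hmem, Bool.false_eq_true, if_false, hadd, ih (s ++ [v]) hs',
          List.append_assoc]

theorem pvLoopA_eq (pkt : List (List (String × Int))) :
    ∀ ss vs ms : List Int, ss.Nodup → vs.Nodup → ms.Nodup →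
      pvLoopA pkt ss vs ms =
        (decide (ss ++ pvCollect ["rs1", "rs2", "rd"] pkt).Nodup
          && decide (vs ++ pvCollect ["vs1", "vs2", "vd", "vmd", "vms"] pkt).Nodup
          && decide (ms ++ pvCollect ["mask", "mask_dest"] pkt).Nodup) := by
  induction pkt with
  | nil => intro ss vs ms h1 h2 h3; simp [pvLoopA, pvCollect, h1, h2, h3]
  | cons instr rest ih =>
    intro ss vs ms h1 h2 h3
    simp only [pvLoopA, pvCollect]
    rw [pvStepKeys_eq _ _ ss h1, pvStepKeys_eq _ _ vs h2, pvStepKeys_eq _ _ ms h3]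
    have notnod : ∀ (s kv rs : List Int), ¬ (s ++ kv).Nodup → ¬ (s ++ (kv ++ rs)).Nodup := by
      intro s kv rs h hn
      exact h (((s ++ kv).sublist_append_left rs).nodup (by rw [← List.append_assoc] at hn; exact hn))
    by_cases n1 : (ss ++ pvKeyVals ["rs1", "rs2", "rd"] instr).Nodup
    · by_cases n2 : (vs ++ pvKeyVals ["vs1", "vs2", "vd", "vmd", "vms"] instr).Nodup
      · by_cases n3 : (ms ++ pvKeyVals ["mask", "mask_dest"] instr).Nodup
        · simp only [if_pos n1, if_pos n2, if_pos n3]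
          rw [ih _ _ _ n1 n2 n3]
          simp only [List.append_assoc]
          rfl
        · simp [if_pos n1, if_pos n2, if_neg n3, notnod _ _ _ n3]
      · simp [if_pos n1, if_neg n2, notnod _ _ _ n2]
    · simp [if_neg n1, notnod _ _ _ n1]

-- len(s) == len(set(s)) is duplicate-freeness
theorem len_ofList_eq_iff (l : List Int) : (PySem.Set.ofList l).length = l.length ↔ l.Nodup := by
  have hperm : List.Perm (PySem.Set.ofList l) l.dedup := by
    refine (List.perm_ext_iff_of_nodup (PySem.Set.nodup_ofList l) l.nodup_dedup).mpr ?_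
    intro x
    rw [PySem.Set.mem_ofList, List.mem_dedup]
  rw [hperm.length_eq]
  constructor
  · intro h
    have hd : l.dedup = l := (l.dedup_sublist).eq_of_length h
    exact hd ▸ l.nodup_dedup
  · intro h; rw [List.dedup_eq_self.mpr h]

theorem beq_len_eq_decide (l : List Int) :
    (l.length == (PySem.Set.ofList l).length) = decide l.Nodup := by
  rw [Bool.eq_iff_iff]
  simp only [beq_iff_eq, decide_eq_true_eq]
  exact ⟨fun h => (len_ofList_eq_iff l).mp h.symm, fun h => ((len_ofList_eq_iff l).mpr h).symm⟩

-- ===== VERDICT (by name: the statement is the Claim_ definition above) =====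
theorem is_packet_independent_check_spec : Claim_equal_is_packet_independent_check := by
  intro pkt _
  unfold Spec_is_packet_independent_check
  have halt : is_packet_independent_check_alt pkt =
      (decide (pvCollect ["rs1", "rs2", "rd"] pkt).Nodup
        && decide (pvCollect ["vs1", "vs2", "vd", "vmd", "vms"] pkt).Nodup
        && decide (pvCollect ["mask", "mask_dest"] pkt).Nodup) := by
    show ((((pvCollect ["rs1", "rs2", "rd"] pkt).length
            == (PySem.Set.ofList (pvCollect ["rs1", "rs2", "rd"] pkt)).length)
        && ((pvCollect ["vs1", "vs2", "vd", "vmd", "vms"] pkt).length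
            == (PySem.Set.ofList (pvCollect ["vs1", "vs2", "vd", "vmd", "vms"] pkt)).length))
        && ((pvCollect ["mask", "mask_dest"] pkt).length
            == (PySem.Set.ofList (pvCollect ["mask", "mask_dest"] pkt)).length)) = _
    rw [beq_len_eq_decide, beq_len_eq_decide, beq_len_eq_decide]
  have ha : is_packet_independent_check pkt = pvLoopA pkt [] [] [] := rfl
  rw [ha, pvLoopA_eq pkt [] [] [] List.nodup_nil List.nodup_nil List.nodup_nil, halt]
  simp only [List.nil_append]
  rfl
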